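-- pv_equiv track=rewrite | github.com/jasonlnheath/AutoDev | autodev.py | _detect_file
-- ===== SOURCE A (Python) =====
-- from typing import Optional, Dict, Any, List
--
-- def _detect_file(error_output: str) -> Optional[str]:
--     """Detect target file from error output."""
--     for line in error_output.split('\n'):
--         if '.py' in line:
--             # Extract file path
--             parts = line.split()
--             for part in parts:
--                 if part.endswith('.py'):
--                     # Clean up the path
--                     path = part.strip(':').strip('"').strip("'")
--                     return path
--     return None
-- ===== SOURCE B (Python) =====
-- from typing import Optional
--
-- def _detect_file(error_output: str) -> Optional[str]:
--     """Detect target file from error output."""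
--     for part in error_output.split():
--         if part.endswith('.py'):
--             return part.strip(':').strip('"').strip("'")
--     return None
-- ===== Notes on version B (the rewrite author's own statement) =====
-- stated objective: simpler
-- what changed: Replaces the nested lines-then-words scan with its redundant per-line substring guard by one flat pass over the whitespace tokens of the whole string.
import Mathlib
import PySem

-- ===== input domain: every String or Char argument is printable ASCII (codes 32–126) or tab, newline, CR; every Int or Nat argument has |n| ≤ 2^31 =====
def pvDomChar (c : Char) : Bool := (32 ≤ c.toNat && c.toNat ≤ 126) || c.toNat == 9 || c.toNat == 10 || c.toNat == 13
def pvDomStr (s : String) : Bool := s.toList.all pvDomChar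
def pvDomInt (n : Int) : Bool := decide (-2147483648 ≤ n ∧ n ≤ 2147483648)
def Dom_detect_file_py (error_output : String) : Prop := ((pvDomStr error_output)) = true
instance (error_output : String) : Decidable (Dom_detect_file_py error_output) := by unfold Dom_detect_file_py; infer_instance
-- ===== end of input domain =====

-- B replaces A's nested lines-then-words scan (with its redundant per-line substring guard)
-- by one flat pass over the whitespace tokens of the whole string (simpler; same value).

-- ===== PORT A =====
-- inner 'for part in parts' loop of A
def partsLoopA : List String → Option String
  | [] => none
  | part :: rest =>
    if PySem.Str.endswith part ".py" then
      some (PySem.Str.stripChars (PySem.Str.stripChars (PySem.Str.stripChars part ":") "\"") "'")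
    else partsLoopA rest

-- outer loop 'for line in error_output.split('\n')' of A
def linesLoopA : List String → Option String
  | [] => none
  | line :: rest =>
    if PySem.Str.isIn ".py" line then
      match partsLoopA (PySem.Str.split₀ line) with
      | some path => some path
      | none => linesLoopA rest
    else linesLoopA rest

def detect_file_py (error_output : String) : Option String :=
  match PySem.Str.split? error_output "\n" with
  | some lines => linesLoopA lines
  | none => none   -- unreachable: the separator "\n" is non-empty

-- ===== PORT B =====
-- single loop 'for part in error_output.split()' of B
def tokenLoopB : List String → Option String
  | [] => none
  | part :: rest =>
    if PySem.Str.endswith part ".py" then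
      some (PySem.Str.stripChars (PySem.Str.stripChars (PySem.Str.stripChars part ":") "\"") "'")
    else tokenLoopB rest

def detect_file_py_alt (error_output : String) : Option String :=
  tokenLoopB (PySem.Str.split₀ error_output)

-- ===== PRECONDITION & SPEC =====
def Spec_detect_file_py (error_output : String) (out : Option String) : Prop := out = detect_file_py_alt error_output
instance (error_output : String) (out : Option String) : Decidable (Spec_detect_file_py error_output out) := by unfold Spec_detect_file_py; infer_instance

-- ===== CLAIM (what is proved, stated in full; the proofs are below) =====
def Claim_equal_detect_file_py : Prop := ∀ (error_output : String), Dom_detect_file_py error_output → Spec_detect_file_py error_output (detect_file_py error_output)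

-- ===== LEMMAS AND PROOFS =====

-- spec-level newline splitter (pieces of s cut at every '\n') and its inverse join
def splitNl : List Char → List (List Char)
  | [] => [[]]
  | c :: r => if c = '\n' then [] :: splitNl r else
      match splitNl r with
      | [] => [[c]]
      | h :: t => (c :: h) :: t

def nlJoin : List (List Char) → List Char
  | [] => []
  | [x] => x
  | x :: y :: t => x ++ '\n' :: nlJoin (y :: t)

lemma splitNl_ne_nil (s : List Char) : splitNl s ≠ [] := by
  induction s with
  | nil => simp [splitNl]
  | cons c r ih =>
    simp only [splitNl]
    split
    · simp
    · cases h : splitNl r <;> simp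

lemma nlJoin_splitNl (s : List Char) : nlJoin (splitNl s) = s := by
  induction s with
  | nil => rfl
  | cons c r ih =>
    simp only [splitNl]
    split
    · rename_i hc
      subst hc
      cases h : splitNl r with
      | nil => exact absurd h (splitNl_ne_nil r)
      | cons a t => rw [h] at ih; simpa [nlJoin] using ih
    · cases h : splitNl r with
      | nil => exact absurd h (splitNl_ne_nil r)
      | cons a t =>
        rw [h] at ih
        cases t with
        | nil => simpa [nlJoin] using ih
        | cons b t' => simpa [nlJoin] using ih

lemma splitOn_go_eq : ∀ (fuel : Nat) (l cur : List Char) (accs : List (List Char)),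
    l.length < fuel →
    PySem.Chars.splitOn.go ['\n'] fuel l cur accs =
      accs.reverse ++ (match splitNl l with
                       | [] => []
                       | h :: t => (cur.reverse ++ h) :: t) := by
  intro fuel
  induction fuel with
  | zero => intro l cur accs h; omega
  | succ f ih =>
    intro l cur accs h
    cases l with
    | nil => simp [PySem.Chars.splitOn.go, splitNl]
    | cons c rest =>
      simp only [PySem.Chars.splitOn.go]
      by_cases hc : c = '\n'
      · rw [if_pos (by simp [hc, List.isPrefixOf])]
        rw [ih _ [] _ (by simp at h ⊢; omega)]
        subst hc
        cases hs : splitNl rest with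
        | nil => exact absurd hs (splitNl_ne_nil rest)
        | cons a t => simp [splitNl, hs]
      · rw [if_neg (by simp [List.isPrefixOf]; exact fun e => hc e.symm)]
        rw [ih rest (c :: cur) accs (by simp at h ⊢; omega)]
        cases hs : splitNl rest with
        | nil => exact absurd hs (splitNl_ne_nil rest)
        | cons a t => simp [splitNl, hs, hc]

lemma splitOn_nl_eq (s : List Char) : PySem.Chars.splitOn s ['\n'] = splitNl s := by
  rw [PySem.Chars.splitOn, splitOn_go_eq (s.length + 1) s [] [] (by omega)]
  cases hs : splitNl s with
  | nil => exact absurd hs (splitNl_ne_nil s)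
  | cons a t => simp

lemma split₀_go_acc : ∀ (s cur : List Char) (acc : List (List Char)),
    PySem.Chars.split₀.go s cur acc = acc.reverse ++ PySem.Chars.split₀.go s cur [] := by
  intro s
  induction s with
  | nil => intro cur acc; simp only [PySem.Chars.split₀.go]; split <;> simp
  | cons c r ih =>
    intro cur acc
    simp only [PySem.Chars.split₀.go]
    split
    · split
      · exact ih [] acc
      · rw [ih [] (cur.reverse :: acc), ih [] [cur.reverse]]; simp
    · exact ih (c :: cur) acc

lemma split₀_go_nl : ∀ (a b cur : List Char),
    PySem.Chars.split₀.go (a ++ '\n' :: b) cur [] =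
      PySem.Chars.split₀.go a cur [] ++ PySem.Chars.split₀.go b [] [] := by
  intro a
  induction a with
  | nil =>
    intro b cur
    simp only [List.nil_append, PySem.Chars.split₀.go]
    have : PySem.Chars.isspace '\n' = true := by decide
    rw [if_pos this]
    by_cases hce : cur.isEmpty
    · simp only [List.isEmpty_iff] at hce
      rw [if_pos (by simp [hce]), hce]
      simp only [List.isEmpty_nil, if_true, List.reverse_nil, List.nil_append]
    · simp only [List.isEmpty_iff] at hce
      rw [if_neg (by simpa using hce), split₀_go_acc b [] [cur.reverse]]
      rw [if_neg (by simpa using hce)]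
  | cons c a' ih =>
    intro b cur
    simp only [List.cons_append, PySem.Chars.split₀.go]
    split
    · split
      · rw [ih b []]
      · rw [split₀_go_acc (a' ++ '\n' :: b) [] [cur.reverse], ih b [],
            split₀_go_acc a' [] [cur.reverse]]
        simp
    · rw [ih b (c :: cur)]

lemma split₀_nlJoin : ∀ (ps : List (List Char)), ps ≠ [] →
    PySem.Chars.split₀ (nlJoin ps) = ps.flatMap PySem.Chars.split₀ := by
  intro ps
  induction ps with
  | nil => intro h; exact absurd rfl h
  | cons x t ih =>
    intro _
    cases t with
    | nil => simp [nlJoin]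
    | cons y t' =>
      show PySem.Chars.split₀ (x ++ '\n' :: nlJoin (y :: t')) = _
      rw [PySem.Chars.split₀, split₀_go_nl, ← PySem.Chars.split₀, ← PySem.Chars.split₀,
          ih (by simp)]
      simp

lemma split₀_go_infix : ∀ (s cur : List Char) (acc : List (List Char)) (t : List Char),
    t ∈ PySem.Chars.split₀.go s cur acc → t ∈ acc ∨ t <:+: (cur.reverse ++ s) := by
  intro s
  induction s with
  | nil =>
    intro cur acc t h
    simp only [PySem.Chars.split₀.go] at h
    split at h
    · left; simpa using h
    · simp only [List.reverse_cons, List.mem_append, List.mem_reverse, List.mem_singleton] at h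
      rcases h with h | h
      · left; exact h
      · right; subst h; simp
  | cons c r ih =>
    intro cur acc t h
    simp only [PySem.Chars.split₀.go] at h
    split at h
    · rename_i hsp
      split at h
      · rcases ih [] acc t h with h' | h'
        · left; exact h'
        · right; exact h'.trans ⟨cur.reverse ++ [c], [], by simp⟩
      · rcases ih [] (cur.reverse :: acc) t h with h' | h'
        · rcases List.mem_cons.mp h' with h'' | h''
          · right; subst h''; exact ⟨[], c :: r, by simp⟩
          · left; exact h''
        · right; exact h'.trans ⟨cur.reverse ++ [c], [], by simp⟩
    · rcases ih (c :: cur) acc t h with h' | h'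
      · left; exact h'
      · right; simpa using h'

lemma mem_split₀_infix (s t : List Char) (h : t ∈ PySem.Chars.split₀ s) : t <:+: s := by
  rcases split₀_go_infix s [] [] t h with h' | h'
  · simp at h'
  · simpa using h'

lemma partsA_eq_tokB : ∀ ts, partsLoopA ts = tokenLoopB ts := by
  intro ts
  induction ts with
  | nil => rfl
  | cons p rest ih => simp [partsLoopA, tokenLoopB, ih]

lemma tokB_append (a b : List String) :
    tokenLoopB (a ++ b) = match tokenLoopB a with
                          | some r => some r
                          | none => tokenLoopB b := by
  induction a with
  | nil => simp [tokenLoopB]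
  | cons p rest ih =>
    simp only [List.cons_append, tokenLoopB]
    split <;> simp [ih]

lemma tokB_none (ts : List String) (h : ∀ t ∈ ts, PySem.Str.endswith t ".py" = false) :
    tokenLoopB ts = none := by
  induction ts with
  | nil => rfl
  | cons p rest ih =>
    simp only [tokenLoopB]
    rw [if_neg (by
          have := h p List.mem_cons_self
          rw [PySem.Str.endswith, show (".py").toList = ['.', 'p', 'y'] from rfl] at this
          simp [this]),
        ih (fun t ht => h t (List.mem_cons_of_mem _ ht))]

-- a line without the substring '.py' contributes no token ending in '.py':
-- A's outer guard is redundant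
lemma guard_none (line : String) (h : PySem.Str.isIn ".py" line = false) :
    tokenLoopB (PySem.Str.split₀ line) = none := by
  apply tokB_none
  intro t ht
  by_contra hne
  have he : PySem.Str.endswith t ".py" = true := by simpa using hne
  rw [PySem.Str.split₀] at ht
  obtain ⟨u, hu, rfl⟩ := List.mem_map.mp ht
  have h1 : (['.', 'p', 'y'] : List Char) <:+ u := by
    exact (PySem.Chars.endswith_iff u ['.', 'p', 'y']).mp (by
      rw [PySem.Str.endswith] at he
      simpa using he)
  have h2 : u <:+: line.toList := mem_split₀_infix _ _ hu
  have h3 : (['.', 'p', 'y'] : List Char) <:+: line.toList := h1.isInfix.trans h2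
  rw [PySem.Str.isIn] at h
  exact (PySem.Chars.isIn_eq_false_iff (".py").toList line.toList).mp h (by simpa using h3)

lemma linesLoop_eq : ∀ lines, linesLoopA lines = tokenLoopB (lines.flatMap PySem.Str.split₀) := by
  intro lines
  induction lines with
  | nil => rfl
  | cons line rest ih =>
    simp only [List.flatMap_cons, linesLoopA, tokB_append, partsA_eq_tokB]
    by_cases h : PySem.Str.isIn ".py" line = true
    · rw [if_pos h, ih]
    · rw [if_neg h, guard_none line (by simpa using h), ih]

-- splitting into lines and then into words gives exactly the words of the whole string
lemma flatMap_split₀ (s : String) :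
    (PySem.Str.split? s "\n").map (fun lines => lines.flatMap PySem.Str.split₀) =
      some (PySem.Str.split₀ s) := by
  rw [PySem.Str.split?, PySem.Chars.split?]
  rw [if_neg (by decide)]
  have hs : "\n".toList = ['\n'] := rfl
  rw [hs, splitOn_nl_eq]
  simp only [Option.map_some, Option.some.injEq]
  calc ((splitNl s.toList).map String.ofList).flatMap PySem.Str.split₀
      = (splitNl s.toList).flatMap (fun p => (PySem.Chars.split₀ p).map String.ofList) := by
        rw [List.flatMap_map]
        congr 1
        funext p
        rw [PySem.Str.split₀, String.toList_ofList]
    _ = ((splitNl s.toList).flatMap PySem.Chars.split₀).map String.ofList := by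
        rw [List.map_flatMap]
    _ = PySem.Str.split₀ s := by
        rw [← split₀_nlJoin _ (splitNl_ne_nil s.toList), nlJoin_splitNl, PySem.Str.split₀]

-- ===== VERDICT (by name: the statement is the Claim_ definition above) =====
theorem detect_file_py_spec : Claim_equal_detect_file_py := by
  intro s _
  unfold Spec_detect_file_py detect_file_py detect_file_py_alt
  have h := flatMap_split₀ s
  cases hs : PySem.Str.split? s "\n" with
  | none => simp [hs] at h
  | some lines =>
    simp only [hs, Option.map_some, Option.some.injEq] at h
    show linesLoopA lines = _
    rw [linesLoop_eq, h]
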